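-- pv_equiv track=rewrite | github.com/wandrzejewski55/problem_wypasionej_imprezy_rozwiniecie_problemu_plecakowego | brute_force_ite.py | iterativeBruteForce
-- ===== SOURCE A (Python) =====
-- def iterativeBruteForce(drinks, snacks, meals, drinks_limit, snacks_limit, meals_limit):
--     n = len(drinks)
--     max_guests = 0
--     selected_guests = []
--
--     for i in range(1 << n):
--         total_drinks = 0
--         total_snacks = 0
--         total_meals = 0
--         total_guests = 0
--         current_selection = []
--
--         for j in range(n):
--             if i & (1 << j):
--                 current_selection.append(j)
--                 total_drinks += drinks[j]
--                 total_snacks += snacks[j]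
--                 total_meals += meals[j]
--                 total_guests += 1
--
--         if (
--             total_drinks <= drinks_limit
--             and total_snacks <= snacks_limit
--             and total_meals <= meals_limit
--             and total_guests > max_guests
--         ):
--             max_guests = total_guests
--             selected_guests = current_selection
--
--     return max_guests, selected_guests
-- ===== SOURCE B (Python) =====
-- def iterativeBruteForce(drinks, snacks, meals, drinks_limit, snacks_limit, meals_limit):
--     n = len(drinks)
--
--     def go(k, td, ts, tm, cnt, sel, best):
--         # bits k-1 .. 0 remain to be decided; excluding first (high bit decided
--         # first) visits subsets exactly in ascending bitmask order, so the
--         # strict '>' keep-rule yields the earliest (smallest-mask) max subset.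
--         if k == 0:
--             if td <= drinks_limit and ts <= snacks_limit and tm <= meals_limit and cnt > best[0]:
--                 return (cnt, sel)
--             return best
--         j = k - 1
--         best = go(j, td, ts, tm, cnt, sel, best)
--         return go(j, td + drinks[j], ts + snacks[j], tm + meals[j],
--                   cnt + 1, [j] + sel, best)
--
--     return go(n, 0, 0, 0, 0, [], (0, []))
-- ===== Notes on version B (the rewrite author's own statement) =====
-- stated objective: alternative
-- what changed: Replaces the 2^n bitmask loop that rebuilds each subset from scratch with an inner per-mask loop by an include/exclude backtracking recursion that passes running totals and the partial selection down, visiting subsets in ascending bitmask order so the strict-'>' tie-break is preserved.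
-- outside the precondition, e.g. on iterativeBruteForce([1], [], [], 5, 5, 5): A raises IndexError, B raises IndexError
import Mathlib
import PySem

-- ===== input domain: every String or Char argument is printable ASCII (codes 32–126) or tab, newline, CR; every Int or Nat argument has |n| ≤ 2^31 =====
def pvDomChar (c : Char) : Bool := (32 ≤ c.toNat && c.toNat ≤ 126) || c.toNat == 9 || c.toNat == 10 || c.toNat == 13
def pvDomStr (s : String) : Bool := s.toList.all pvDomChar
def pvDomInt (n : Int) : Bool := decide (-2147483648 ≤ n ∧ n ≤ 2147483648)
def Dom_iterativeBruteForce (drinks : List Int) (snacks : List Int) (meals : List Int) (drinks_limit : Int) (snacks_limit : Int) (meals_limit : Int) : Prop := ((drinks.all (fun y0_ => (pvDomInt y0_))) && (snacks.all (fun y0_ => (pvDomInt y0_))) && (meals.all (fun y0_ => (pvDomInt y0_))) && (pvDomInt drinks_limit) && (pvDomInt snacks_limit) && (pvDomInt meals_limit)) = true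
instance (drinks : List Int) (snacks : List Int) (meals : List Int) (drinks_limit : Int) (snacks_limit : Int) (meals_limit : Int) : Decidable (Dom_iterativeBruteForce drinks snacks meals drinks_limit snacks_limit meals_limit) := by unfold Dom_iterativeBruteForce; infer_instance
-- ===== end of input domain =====

-- B replaces the 2^n-bitmask loop (with an inner per-mask rebuild loop) by an
-- include/exclude backtracking recursion passing running totals down; alternative
-- decomposition, same visiting order (ascending bitmask), identical results.


-- ===== PORT A =====
-- literal port: for i in range(1 << n): inner loop over j accumulating totals and
-- the selection, then the strict-'>' update.  drinks[j]/snacks[j]/meals[j] are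
-- ported with pyGetD; Pre_ guarantees j is always in range, exactly where Python
-- returns instead of raising IndexError.
def iterativeBruteForce (drinks : List Int) (snacks : List Int) (meals : List Int) (drinks_limit : Int) (snacks_limit : Int) (meals_limit : Int) : Int × List Int :=
  let n := drinks.length
  (List.range (1 <<< n)).foldl
    (fun (best : Int × List Int) i =>
      let st := (List.range n).foldl
        (fun (st : Int × Int × Int × Int × List Int) j =>
          if i &&& (1 <<< j) ≠ 0 then
            (st.1 + PySem.List.pyGetD drinks (j : Int) 0,
             st.2.1 + PySem.List.pyGetD snacks (j : Int) 0,
             st.2.2.1 + PySem.List.pyGetD meals (j : Int) 0,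
             st.2.2.2.1 + 1,
             st.2.2.2.2 ++ [(j : Int)])
          else st)
        (0, 0, 0, 0, ([] : List Int))
      if st.1 ≤ drinks_limit ∧ st.2.1 ≤ snacks_limit ∧ st.2.2.1 ≤ meals_limit ∧ st.2.2.2.1 > best.1
      then (st.2.2.2.1, st.2.2.2.2) else best)
    (0, [])

-- ===== PORT B =====
-- literal port of Source B's recursion go(k, td, ts, tm, cnt, sel, best)
def pvGoAlt (drinks : List Int) (snacks : List Int) (meals : List Int) (drinks_limit : Int) (snacks_limit : Int) (meals_limit : Int) : Nat → Int → Int → Int → Int → List Int → Int × List Int → Int × List Int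
  | 0, td, ts, tm, cnt, sel, best =>
      if td ≤ drinks_limit ∧ ts ≤ snacks_limit ∧ tm ≤ meals_limit ∧ cnt > best.1 then (cnt, sel) else best
  | j + 1, td, ts, tm, cnt, sel, best =>
      let best1 := pvGoAlt drinks snacks meals drinks_limit snacks_limit meals_limit j td ts tm cnt sel best
      pvGoAlt drinks snacks meals drinks_limit snacks_limit meals_limit j
        (td + PySem.List.pyGetD drinks (j : Int) 0)
        (ts + PySem.List.pyGetD snacks (j : Int) 0)
        (tm + PySem.List.pyGetD meals (j : Int) 0)
        (cnt + 1) ((j : Int) :: sel) best1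

def iterativeBruteForce_alt (drinks : List Int) (snacks : List Int) (meals : List Int) (drinks_limit : Int) (snacks_limit : Int) (meals_limit : Int) : Int × List Int :=
  pvGoAlt drinks snacks meals drinks_limit snacks_limit meals_limit drinks.length 0 0 0 0 [] (0, [])

-- ===== PRECONDITION & SPEC =====
-- Pre_ excludes exactly the inputs on which Python A raises IndexError:
-- snacks or meals shorter than drinks (both programs index snacks[j]/meals[j]
-- for j < len(drinks)).
def Pre_iterativeBruteForce (drinks : List Int) (snacks : List Int) (meals : List Int) (drinks_limit : Int) (snacks_limit : Int) (meals_limit : Int) : Prop :=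
  drinks.length ≤ snacks.length ∧ drinks.length ≤ meals.length
instance (drinks : List Int) (snacks : List Int) (meals : List Int) (drinks_limit : Int) (snacks_limit : Int) (meals_limit : Int) : Decidable (Pre_iterativeBruteForce drinks snacks meals drinks_limit snacks_limit meals_limit) := by unfold Pre_iterativeBruteForce; infer_instance

def pvWitness_iterativeBruteForce : List Int × List Int × List Int × Int × Int × Int := ([1, 2], [1, 1], [0, 3], 3, 2, 3)

def Spec_iterativeBruteForce (drinks : List Int) (snacks : List Int) (meals : List Int) (drinks_limit : Int) (snacks_limit : Int) (meals_limit : Int) (out : Int × List Int) : Prop := out = iterativeBruteForce_alt drinks snacks meals drinks_limit snacks_limit meals_limit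
instance (drinks : List Int) (snacks : List Int) (meals : List Int) (drinks_limit : Int) (snacks_limit : Int) (meals_limit : Int) (out : Int × List Int) : Decidable (Spec_iterativeBruteForce drinks snacks meals drinks_limit snacks_limit meals_limit out) := by unfold Spec_iterativeBruteForce; infer_instance

-- ===== CLAIM (what is proved, stated in full; the proofs are below) =====
def Claim_equal_iterativeBruteForce : Prop := ∀ (drinks : List Int) (snacks : List Int) (meals : List Int) (drinks_limit : Int) (snacks_limit : Int) (meals_limit : Int), Dom_iterativeBruteForce drinks snacks meals drinks_limit snacks_limit meals_limit → Pre_iterativeBruteForce drinks snacks meals drinks_limit snacks_limit meals_limit → Spec_iterativeBruteForce drinks snacks meals drinks_limit snacks_limit meals_limit (iterativeBruteForce drinks snacks meals drinks_limit snacks_limit meals_limit)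

-- ===== LEMMAS AND PROOFS =====

-- witness satisfies Dom and Pre
theorem pvWitness_ok :
    Dom_iterativeBruteForce (pvWitness_iterativeBruteForce.1) (pvWitness_iterativeBruteForce.2.1) (pvWitness_iterativeBruteForce.2.2.1) (pvWitness_iterativeBruteForce.2.2.2.1) (pvWitness_iterativeBruteForce.2.2.2.2.1) (pvWitness_iterativeBruteForce.2.2.2.2.2) ∧
    Pre_iterativeBruteForce (pvWitness_iterativeBruteForce.1) (pvWitness_iterativeBruteForce.2.1) (pvWitness_iterativeBruteForce.2.2.1) (pvWitness_iterativeBruteForce.2.2.2.1) (pvWitness_iterativeBruteForce.2.2.2.2.1) (pvWitness_iterativeBruteForce.2.2.2.2.2) := by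
  decide

-- the ascending list of set bits of i below k
def pvBits (k i : Nat) : List Nat := (List.range k).filter (fun j => i.testBit j)

-- the state reached after adding the items of the bits of i below k to st
def pvG (drinks snacks meals : List Int) (k i : Nat) (st : Int × Int × Int × Int × List Int) : Int × Int × Int × Int × List Int :=
  (st.1 + ((pvBits k i).map (fun j => PySem.List.pyGetD drinks (j : Int) 0)).sum,
   st.2.1 + ((pvBits k i).map (fun j => PySem.List.pyGetD snacks (j : Int) 0)).sum,
   st.2.2.1 + ((pvBits k i).map (fun j => PySem.List.pyGetD meals (j : Int) 0)).sum,
   st.2.2.2.1 + (pvBits k i).length,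
   (pvBits k i).map (fun j => (j : Int)) ++ st.2.2.2.2)

-- the strict-'>' best-update both programs perform
def pvUpd (drinks_limit snacks_limit meals_limit : Int) (best : Int × List Int) (st : Int × Int × Int × Int × List Int) : Int × List Int :=
  if st.1 ≤ drinks_limit ∧ st.2.1 ≤ snacks_limit ∧ st.2.2.1 ≤ meals_limit ∧ st.2.2.2.1 > best.1
  then (st.2.2.2.1, st.2.2.2.2) else best

theorem pvCond_iff (i j : Nat) : (i &&& (1 <<< j) ≠ 0) ↔ i.testBit j = true := by
  rw [Nat.one_shiftLeft, Nat.and_two_pow]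
  cases h : i.testBit j <;> simp

theorem pvBits_succ (k i : Nat) :
    pvBits (k + 1) i = pvBits k i ++ (if i.testBit k then [k] else []) := by
  simp [pvBits, List.range_succ, List.filter_append, List.filter_singleton]

theorem pvBits_lt {m k : Nat} (h : m < 2 ^ k) : pvBits (k + 1) m = pvBits k m := by
  rw [pvBits_succ, Nat.testBit_lt_two_pow h]
  simp

theorem pvBits_low {m k : Nat} : pvBits k (2 ^ k + m) = pvBits k m := by
  unfold pvBits
  apply List.filter_congr
  intro j hj
  rw [Nat.testBit_two_pow_add_gt (List.mem_range.mp hj) m]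

theorem pvBits_add {m k : Nat} (h : m < 2 ^ k) :
    pvBits (k + 1) (2 ^ k + m) = pvBits k m ++ [k] := by
  rw [pvBits_succ, pvBits_low, Nat.testBit_two_pow_add_eq, Nat.testBit_lt_two_pow h]
  simp

-- pvG with m's bits below k nonexistent / split off
theorem pvG_lt (drinks snacks meals : List Int) {m k : Nat} (h : m < 2 ^ k)
    (st : Int × Int × Int × Int × List Int) :
    pvG drinks snacks meals (k + 1) m st = pvG drinks snacks meals k m st := by
  unfold pvG
  rw [pvBits_lt h]

theorem pvG_add (drinks snacks meals : List Int) {m k : Nat} (h : m < 2 ^ k)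
    (td ts tm cnt : Int) (sel : List Int) :
    pvG drinks snacks meals (k + 1) (2 ^ k + m) (td, ts, tm, cnt, sel)
      = pvG drinks snacks meals k m
          (td + PySem.List.pyGetD drinks (k : Int) 0,
           ts + PySem.List.pyGetD snacks (k : Int) 0,
           tm + PySem.List.pyGetD meals (k : Int) 0,
           cnt + 1, (k : Int) :: sel) := by
  unfold pvG
  rw [pvBits_add h]
  simp [List.map_append, List.sum_append, Prod.ext_iff]
  refine ⟨by omega, by omega, by omega, by omega⟩

-- the inner loop of port A, with the selection appended on the right
theorem pvInnerA_eq (drinks snacks meals : List Int) (i : Nat) :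
    ∀ (k : Nat) (st : Int × Int × Int × Int × List Int),
    (List.range k).foldl
      (fun (st : Int × Int × Int × Int × List Int) j =>
        if i &&& (1 <<< j) ≠ 0 then
          (st.1 + PySem.List.pyGetD drinks (j : Int) 0,
           st.2.1 + PySem.List.pyGetD snacks (j : Int) 0,
           st.2.2.1 + PySem.List.pyGetD meals (j : Int) 0,
           st.2.2.2.1 + 1,
           st.2.2.2.2 ++ [(j : Int)])
        else st) st
      = (st.1 + ((pvBits k i).map (fun j => PySem.List.pyGetD drinks (j : Int) 0)).sum,
         st.2.1 + ((pvBits k i).map (fun j => PySem.List.pyGetD snacks (j : Int) 0)).sum,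
         st.2.2.1 + ((pvBits k i).map (fun j => PySem.List.pyGetD meals (j : Int) 0)).sum,
         st.2.2.2.1 + (pvBits k i).length,
         st.2.2.2.2 ++ (pvBits k i).map (fun j => (j : Int))) := by
  intro k
  induction k with
  | zero => intro st; simp [pvBits]
  | succ k ih =>
      intro st
      obtain ⟨a, b, c, d, e⟩ := st
      rw [List.range_succ, List.foldl_append, ih]
      by_cases h : i.testBit k
      · simp only [List.foldl_cons, List.foldl_nil,
          if_pos ((pvCond_iff i k).mpr h), pvBits_succ, h, if_pos]
        simp [add_assoc]
      · have hc : ¬ (i &&& (1 <<< k) ≠ 0) := by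
          simp [pvCond_iff, h]
        simp only [List.foldl_cons, List.foldl_nil, if_neg hc, pvBits_succ, h]
        simp

-- B's recursion over k remaining bits equals the fold of pvUpd over masks 0..2^k-1
theorem pvGoAlt_eq (drinks snacks meals : List Int) (dl sl ml : Int) :
    ∀ (k : Nat) (td ts tm cnt : Int) (sel : List Int) (best : Int × List Int),
    pvGoAlt drinks snacks meals dl sl ml k td ts tm cnt sel best
      = (List.range (2 ^ k)).foldl
          (fun b m => pvUpd dl sl ml b (pvG drinks snacks meals k m (td, ts, tm, cnt, sel))) best := by
  intro k
  induction k with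
  | zero =>
      intro td ts tm cnt sel best
      simp [pvGoAlt, pvG, pvBits, pvUpd, List.range_one]
  | succ k ih =>
      intro td ts tm cnt sel best
      have hsplit : (2 : Nat) ^ (k + 1) = 2 ^ k + 2 ^ k := by ring
      rw [pvGoAlt, ih, ih, hsplit, List.range_add, List.foldl_append, List.foldl_map]
      have hinner :
          (List.range (2 ^ k)).foldl
            (fun b m => pvUpd dl sl ml b (pvG drinks snacks meals k m (td, ts, tm, cnt, sel))) best
          = (List.range (2 ^ k)).foldl
            (fun b m => pvUpd dl sl ml b (pvG drinks snacks meals (k + 1) m (td, ts, tm, cnt, sel))) best := by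
        apply PySem.List.foldl_congr_mem
        intro acc m hm
        rw [pvG_lt drinks snacks meals (List.mem_range.mp hm)]
      rw [hinner]
      apply PySem.List.foldl_congr_mem
      intro acc m hm
      rw [pvG_add drinks snacks meals (List.mem_range.mp hm)]

theorem pv_main (drinks snacks meals : List Int) (dl sl ml : Int) :
    iterativeBruteForce drinks snacks meals dl sl ml
      = iterativeBruteForce_alt drinks snacks meals dl sl ml := by
  unfold iterativeBruteForce iterativeBruteForce_alt
  rw [pvGoAlt_eq,
    show (2 : Nat) ^ drinks.length = 1 <<< drinks.length from (Nat.one_shiftLeft _).symm]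
  apply PySem.List.foldl_congr_mem
  intro best i _
  rw [pvInnerA_eq drinks snacks meals i drinks.length (0, 0, 0, 0, ([] : List Int))]
  simp [pvUpd, pvG]

-- ===== VERDICT (by name: the statement is the Claim_ definition above) =====
theorem iterativeBruteForce_spec : Claim_equal_iterativeBruteForce := by
  intro drinks snacks meals dl sl ml _ _
  unfold Spec_iterativeBruteForce
  exact pv_main drinks snacks meals dl sl ml
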